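-- pv_equiv track=rewrite | github.com/paulobmsousa/AllCodes | bic.py | chname
-- ===== SOURCE A (Python) =====
-- def chname(filename):
--    outputfile = ''
--    for ch in filename:
--       int1 = ord(ch)
--       if (int1>=48 and int1<=57):
--          int2 = abs(48-int1)+48
--       elif (int1>=65 and int1<=90):
--          int2 = abs(90-int1)+65
--       elif (int1>=97 and int1<=122):
--          int2 = abs(122-int1)+97
--       else:
--          int2 = int1
--       ch2 = chr(int2)
--       outputfile += ch2
--    return outputfile
-- ===== SOURCE B (Python) =====
-- def chname(filename):
--     # Build the identity table for codes 0..127, then reverse the two letter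
--     # slices in place: the mirror map is never computed per character, it
--     # arises from reversing the A-Z and a-z segments of the identity array.
--     tbl = [chr(i) for i in range(128)]
--     tbl[65:91] = tbl[65:91][::-1]
--     tbl[97:123] = tbl[97:123][::-1]
--     return ''.join(tbl[ord(ch)] if ord(ch) < 128 else ch for ch in filename)
-- ===== Notes on version B (the rewrite author's own statement) =====
-- stated objective: alternative
-- what changed: A computes the mirror per character with ord-range branches and abs arithmetic (its digit branch is a no-op); B never computes a mirror per character: it builds the identity code table 0..127 once, reverses the A-Z and a-z slices in place, and maps the string through that array by code index (also avoids A's quadratic += string accumulation).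
import Mathlib
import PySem

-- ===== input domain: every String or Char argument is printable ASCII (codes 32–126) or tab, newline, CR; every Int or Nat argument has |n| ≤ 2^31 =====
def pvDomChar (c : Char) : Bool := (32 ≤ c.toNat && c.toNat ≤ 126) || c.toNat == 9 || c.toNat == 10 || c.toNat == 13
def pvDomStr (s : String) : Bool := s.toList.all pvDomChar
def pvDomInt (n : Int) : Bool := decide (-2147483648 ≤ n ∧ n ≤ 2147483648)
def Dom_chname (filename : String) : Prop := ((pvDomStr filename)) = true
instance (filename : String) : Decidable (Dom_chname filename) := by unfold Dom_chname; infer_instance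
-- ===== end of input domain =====

-- B builds an identity 0..127 table and reverses its A-Z and a-z slices, then maps
-- the string through that array by code; an alternative mechanism, not claimed faster.


-- ===== PORT A =====
-- per-character body of A's loop: ord-range branches, abs via Int.natAbs, chr via Char.ofNat
def chnameStep (ch : Char) : Char :=
  let int1 : Int := ch.toNat
  let int2 : Int :=
    if 48 ≤ int1 ∧ int1 ≤ 57 then ((48 - int1).natAbs : Int) + 48
    else if 65 ≤ int1 ∧ int1 ≤ 90 then ((90 - int1).natAbs : Int) + 65
    else if 97 ≤ int1 ∧ int1 ≤ 122 then ((122 - int1).natAbs : Int) + 97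
    else int1
  Char.ofNat int2.toNat

def chname (filename : String) : String :=
  String.mk (filename.toList.foldl (fun acc ch => acc ++ [chnameStep ch]) [])

-- ===== PORT B =====
-- tbl = [chr(i) for i in range(128)]; tbl[65:91] = tbl[65:91][::-1]; tbl[97:123] = tbl[97:123][::-1]
-- (slice assignment ported as take/segment/drop splice; segment via PySem.List.slice then List.reverse)
def chnameTbl : List Char :=
  let t := (List.range 128).map (fun i => Char.ofNat i)
  let t := t.take 65 ++ (PySem.List.slice t (some 65) (some 91)).reverse ++ t.drop 91
  t.take 97 ++ (PySem.List.slice t (some 97) (some 123)).reverse ++ t.drop 123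

-- tbl[ord(ch)] is ported with List.getD (exact here: the guard ensures the index is in range)
def chname_alt (filename : String) : String :=
  String.mk (filename.toList.map (fun ch =>
    if ch.toNat < 128 then chnameTbl.getD ch.toNat ch else ch))

-- ===== PRECONDITION & SPEC =====
def Spec_chname (filename : String) (out : String) : Prop := out = chname_alt filename
instance (filename : String) (out : String) : Decidable (Spec_chname filename out) := by unfold Spec_chname; infer_instance

-- ===== CLAIM (what is proved, stated in full; the proofs are below) =====
def Claim_equal_chname : Prop := ∀ (filename : String), Dom_chname filename → Spec_chname filename (chname filename)

-- ===== LEMMAS AND PROOFS =====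

-- the two per-character transforms agree on every character code 0..126
set_option maxRecDepth 8000 in
theorem chname_step_small : ∀ n ∈ List.range 127,
    chnameStep (Char.ofNat n) =
      (if (Char.ofNat n).toNat < 128 then chnameTbl.getD (Char.ofNat n).toNat (Char.ofNat n)
       else Char.ofNat n) := by decide

theorem chname_step_eq (c : Char) (h : pvDomChar c = true) :
    chnameStep c = (if c.toNat < 128 then chnameTbl.getD c.toNat c else c) := by
  have hlt : c.toNat < 127 := by
    simp only [pvDomChar, Bool.or_eq_true, Bool.and_eq_true, decide_eq_true_eq, beq_iff_eq] at h
    omega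
  have hc : Char.ofNat c.toNat = c := Char.ofNat_toNat c
  have := chname_step_small c.toNat (List.mem_range.mpr hlt)
  rwa [hc] at this

theorem chname_spec : Claim_equal_chname := by
  intro filename hdom
  unfold Spec_chname chname chname_alt
  rw [PySem.List.foldl_append_eq_flatMap]
  simp only [List.nil_append]
  congr 1
  rw [← List.map_eq_flatMap]
  apply List.map_congr_left
  intro c hc
  have hd : pvDomChar c = true := by
    have := hdom
    unfold Dom_chname pvDomStr at this
    exact List.all_eq_true.mp this c hc
  exact chname_step_eq c hd
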